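-- pv_equiv track=rewrite | github.com/HalfClock/secretCode | mainfile/SDK_python/CodeCraft-2019/src/testdijkstra.py | compute_cross_priority
-- ===== SOURCE A (Python) =====
-- import math
--
-- def compute_cross_priority(cross_location_matrix):
--     """
--     这个函数假设路口位置矩阵是一个方阵
--     :param cross_location_matrix: 路口位置矩阵
--     :return: 路口优先级字典：{key = 路口id，value = (层级数，优先级数)}
--     """
--
--     #确定有多少层级
--     lens = len(cross_location_matrix)
--     layers_num =  math.ceil(float(len(cross_location_matrix))/2)
--
--     cross_priority_dict = {}
--
--     for layer in range(0,layers_num):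
--         count = 0
--         for j in range(layer,lens-layer):
--
--             cross_priority_dict[cross_location_matrix[layer][j]] = (layer,count)
--             cross_priority_dict[cross_location_matrix[lens-layer -1][lens - j -1]] = (layer,count)
--             count+=1
--
--         for i in range(layer + 1,lens - layer -1):
--
--             cross_priority_dict[cross_location_matrix[i][lens - layer -1]] = (layer,count)
--             cross_priority_dict[cross_location_matrix[lens - i -1][layer]] = (layer,count)
--             count+=1
--
--     return cross_priority_dict
-- ===== SOURCE B (Python) =====
-- def compute_cross_priority(cross_location_matrix):
--     """Recursive ring-peeling: each ring's entries are built as lists from row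
--     slices and column comprehensions (zip/enumerate, no mutable dict or counter),
--     and the dict is assembled once at the end from the full entry sequence."""
--     m = cross_location_matrix
--     n = len(m)
--
--     def peel(layer):
--         if n - layer <= layer:
--             return []
--         top = m[layer][layer:n - layer]
--         bot = m[n - 1 - layer][layer:n - layer][::-1]
--         right = [m[i][n - 1 - layer] for i in range(layer + 1, n - 1 - layer)]
--         left = [m[n - 1 - i][layer] for i in range(layer + 1, n - 1 - layer)]
--         w = n - 2 * layer
--         ring = [e for c, (a, b) in enumerate(zip(top, bot))
--                   for e in ((a, (layer, c)), (b, (layer, c)))]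
--         ring += [e for c, (a, b) in enumerate(zip(right, left))
--                    for e in ((a, (layer, w + c)), (b, (layer, w + c)))]
--         return ring + peel(layer + 1)
--
--     return dict(peel(0))
-- ===== Notes on version B (the rewrite author's own statement) =====
-- stated objective: alternative
-- what changed: A's per-layer index loops mutating a dict with a running counter are replaced by a recursive ring peel that builds each ring's entry list from row slices and column comprehensions via zip/enumerate and assembles the dict once at the end.
import Mathlib
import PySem

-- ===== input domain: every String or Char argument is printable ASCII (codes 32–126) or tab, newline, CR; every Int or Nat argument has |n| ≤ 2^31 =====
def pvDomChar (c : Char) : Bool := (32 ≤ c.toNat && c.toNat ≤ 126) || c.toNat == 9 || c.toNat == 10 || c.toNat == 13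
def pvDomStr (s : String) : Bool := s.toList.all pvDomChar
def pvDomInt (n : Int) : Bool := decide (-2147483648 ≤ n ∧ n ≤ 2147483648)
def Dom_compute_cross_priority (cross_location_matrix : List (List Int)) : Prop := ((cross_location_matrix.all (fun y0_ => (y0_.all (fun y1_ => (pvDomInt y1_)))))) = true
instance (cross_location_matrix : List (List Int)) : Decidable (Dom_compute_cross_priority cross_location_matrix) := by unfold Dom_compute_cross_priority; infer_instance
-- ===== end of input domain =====

-- B replaces A's per-layer index loops with mutable dict/counter by a recursive ring
-- peel building each ring's entry list from slices and zip/enumerate, assembling the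
-- dict once at the end (objective: alternative decomposition).

-- ===== PORT A =====
def compute_cross_priority (cross_location_matrix : List (List Int)) : List (Int × Int × Int) :=
  let m := cross_location_matrix
  let lens : Int := m.length
  -- math.ceil(float(lens)/2): float(lens) is exact for |lens| ≤ 2^31, so this is ⌈lens/2⌉ = (lens+1)//2
  let layers_num : Int := PySem.Int.floordiv (lens + 1) 2
  let d : PySem.Dict Int (Int × Int) :=
    (PySem.List.pyRange 0 layers_num).foldl (fun d layer =>
      let p1 := (PySem.List.pyRange layer (lens - layer)).foldl
        (fun (p : PySem.Dict Int (Int × Int) × Int) j =>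
          ((p.1.insert (PySem.List.pyGetD (PySem.List.pyGetD m layer []) j 0) (layer, p.2)).insert
              (PySem.List.pyGetD (PySem.List.pyGetD m (lens - layer - 1) []) (lens - j - 1) 0) (layer, p.2),
           p.2 + 1)) (d, 0)
      let p2 := (PySem.List.pyRange (layer + 1) (lens - layer - 1)).foldl
        (fun (p : PySem.Dict Int (Int × Int) × Int) i =>
          ((p.1.insert (PySem.List.pyGetD (PySem.List.pyGetD m i []) (lens - layer - 1) 0) (layer, p.2)).insert
              (PySem.List.pyGetD (PySem.List.pyGetD m (lens - i - 1) []) layer 0) (layer, p.2),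
           p.2 + 1)) p1
      p2.1) PySem.Dict.empty
  d.items

-- ===== PORT B =====
-- helper: the recursive ring peel of Source B ([::-1] ported as .reverse, cf. PySem.List.slice?_none_none_neg_one)
def pvPeel (m : List (List Int)) (n : Int) (layer : Int) : List (Int × Int × Int) :=
  if n - layer ≤ layer then []
  else
    let top := PySem.List.slice (PySem.List.pyGetD m layer []) (some layer) (some (n - layer))
    let bot := (PySem.List.slice (PySem.List.pyGetD m (n - 1 - layer) []) (some layer) (some (n - layer))).reverse
    let right := (PySem.List.pyRange (layer + 1) (n - 1 - layer)).map
      (fun i => PySem.List.pyGetD (PySem.List.pyGetD m i []) (n - 1 - layer) 0)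
    let left := (PySem.List.pyRange (layer + 1) (n - 1 - layer)).map
      (fun i => PySem.List.pyGetD (PySem.List.pyGetD m (n - 1 - i) []) layer 0)
    let w := n - 2 * layer
    let ring := (PySem.List.enumerate (top.zip bot)).flatMap
      (fun ce => [(ce.2.1, (layer, ce.1)), (ce.2.2, (layer, ce.1))])
    let ring2 := (PySem.List.enumerate (right.zip left)).flatMap
      (fun ce => [(ce.2.1, (layer, w + ce.1)), (ce.2.2, (layer, w + ce.1))])
    ring ++ ring2 ++ pvPeel m n (layer + 1)
termination_by (n - 2 * layer).toNat
decreasing_by omega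

def compute_cross_priority_alt (cross_location_matrix : List (List Int)) : List (Int × Int × Int) :=
  let n : Int := cross_location_matrix.length
  (PySem.Dict.ofList (pvPeel cross_location_matrix n 0) : PySem.Dict Int (Int × Int)).items

-- ===== PRECONDITION & SPEC =====
-- A indexes every column 0..n-1 of every row (n = number of rows); a row shorter than n raises
-- IndexError, so Pre_ = "every row has at least n entries" is exactly A's return domain.
def Pre_compute_cross_priority (cross_location_matrix : List (List Int)) : Prop :=
  ∀ row ∈ cross_location_matrix, (cross_location_matrix.length : Int) ≤ row.length
instance (cross_location_matrix : List (List Int)) : Decidable (Pre_compute_cross_priority cross_location_matrix) := by unfold Pre_compute_cross_priority; infer_instance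
def pvWitness_compute_cross_priority : List (List Int) := [[1, 2], [3, 4]]

def Spec_compute_cross_priority (cross_location_matrix : List (List Int)) (out : List (Int × Int × Int)) : Prop := out = compute_cross_priority_alt cross_location_matrix
instance (cross_location_matrix : List (List Int)) (out : List (Int × Int × Int)) : Decidable (Spec_compute_cross_priority cross_location_matrix out) := by unfold Spec_compute_cross_priority; infer_instance

-- ===== CLAIM (what is proved, stated in full; the proofs are below) =====
def Claim_equal_compute_cross_priority : Prop := ∀ (cross_location_matrix : List (List Int)), Dom_compute_cross_priority cross_location_matrix → Pre_compute_cross_priority cross_location_matrix → Spec_compute_cross_priority cross_location_matrix (compute_cross_priority cross_location_matrix)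

-- ===== LEMMAS AND PROOFS =====

-- the per-layer entry sequence, phrased as A emits it
def pvRing (m : List (List Int)) (n layer : Int) : List (Int × Int × Int) :=
  (PySem.List.enumerate (PySem.List.pyRange layer (n - layer))).flatMap
    (fun cj => [(PySem.List.pyGetD (PySem.List.pyGetD m layer []) cj.2 0, (layer, cj.1)),
                (PySem.List.pyGetD (PySem.List.pyGetD m (n - layer - 1) []) (n - cj.2 - 1) 0, (layer, cj.1))])
  ++ (PySem.List.enumerate (PySem.List.pyRange (layer + 1) (n - layer - 1)) (n - 2 * layer)).flatMap
    (fun ci => [(PySem.List.pyGetD (PySem.List.pyGetD m ci.2 []) (n - layer - 1) 0, (layer, ci.1)),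
                (PySem.List.pyGetD (PySem.List.pyGetD m (n - ci.2 - 1) []) layer 0, (layer, ci.1))])

lemma pvEnumShift {α : Type} (xs : List α) (s t : Int) :
    PySem.List.enumerate xs (s + t) = (PySem.List.enumerate xs t).map (fun p => (s + p.1, p.2)) := by
  induction xs generalizing t with
  | nil => simp [PySem.List.enumerate]
  | cons x xs ih =>
    simp only [PySem.List.enumerate_cons, List.map_cons]
    rw [show s + t + 1 = s + (t + 1) by ring, ih]

lemma pvEnumMap {α β : Type} (xs : List α) (h : α → β) (s : Int) :
    PySem.List.enumerate (xs.map h) s = (PySem.List.enumerate xs s).map (fun p => (p.1, h p.2)) := by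
  induction xs generalizing s with
  | nil => simp [PySem.List.enumerate]
  | cons x xs ih => simp [PySem.List.enumerate_cons, ih]

lemma pvFoldlInsert2 {α : Type} (xs : List α) (k1 k2 : α → Int) (L : Int) :
    ∀ (d : PySem.Dict Int (Int × Int)) (c : Int),
    List.foldl (fun (p : PySem.Dict Int (Int × Int) × Int) x =>
        ((p.1.insert (k1 x) (L, p.2)).insert (k2 x) (L, p.2), p.2 + 1)) (d, c) xs
    = (List.foldl (fun d kv => d.insert kv.1 kv.2) d
        ((PySem.List.enumerate xs c).flatMap (fun ce => [(k1 ce.2, (L, ce.1)), (k2 ce.2, (L, ce.1))])),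
       c + xs.length) := by
  induction xs with
  | nil => intro d c; simp [PySem.List.enumerate]
  | cons x xs ih =>
    intro d c
    simp only [List.foldl_cons, PySem.List.enumerate_cons, List.flatMap_cons, List.foldl_append,
      ih, List.length_cons]
    rw [Prod.mk.injEq]
    refine ⟨by rfl, by push_cast; ring⟩

lemma pvFoldlFlatMap {α β : Type} (l : List α) (g : α → List (Int × β)) (ins : PySem.Dict Int β → Int × β → PySem.Dict Int β) :
    ∀ d0, List.foldl (fun d x => List.foldl ins d (g x)) d0 l = List.foldl ins d0 (l.flatMap g) := by
  induction l with
  | nil => intro d0; simp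
  | cons x l ih => intro d0; simp [List.foldl_append, ih]

lemma pvSliceEqMap (xs : List Int) (a b : Int) (h0 : 0 ≤ a) (hab : a ≤ b) (hb : b ≤ (xs.length : Int)) :
    PySem.List.slice xs (some a) (some b) = (PySem.List.pyRange a b).map (fun j => PySem.List.pyGetD xs j 0) := by
  rw [PySem.List.slice_of_nonneg xs h0 (by omega) (by omega) hb, PySem.List.pyRange_one]
  apply List.ext_getElem
  · simp; omega
  · intro k hk1 hk2
    simp only [List.getElem_take, List.getElem_drop, List.getElem_map, List.getElem_range]
    rw [PySem.List.pyGetD_eq_getElem xs 0 (by omega) (by simp at hk2 ⊢; omega)]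
    congr 1
    omega

lemma pvReverseMapRange (a b : Int) (f : Int → Int) :
    ((PySem.List.pyRange a b).map f).reverse = (PySem.List.pyRange a b).map (fun j => f (a + b - 1 - j)) := by
  apply List.ext_getElem
  · simp
  · intro k hk1 hk2
    simp only [List.getElem_reverse, List.getElem_map]
    rw [PySem.List.getElem_pyRange_one, PySem.List.getElem_pyRange_one]
    congr 1
    simp [PySem.List.length_pyRange_one] at hk1 hk2 ⊢
    omega

-- B's per-layer block equals pvRing (uses Pre_: the slices cover all columns layer..n-layer-1)
lemma pvRingB (m : List (List Int)) (n layer : Int) (hn : n = (m.length : Int))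
    (hPre : Pre_compute_cross_priority m) (h0 : 0 ≤ layer) (h1 : layer < n - layer) :
    (PySem.List.enumerate
        ((PySem.List.slice (PySem.List.pyGetD m layer []) (some layer) (some (n - layer))).zip
         (PySem.List.slice (PySem.List.pyGetD m (n - 1 - layer) []) (some layer) (some (n - layer))).reverse)).flatMap
      (fun ce => [(ce.2.1, (layer, ce.1)), (ce.2.2, (layer, ce.1))])
    ++ (PySem.List.enumerate
        (((PySem.List.pyRange (layer + 1) (n - 1 - layer)).map
            (fun i => PySem.List.pyGetD (PySem.List.pyGetD m i []) (n - 1 - layer) 0)).zip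
         ((PySem.List.pyRange (layer + 1) (n - 1 - layer)).map
            (fun i => PySem.List.pyGetD (PySem.List.pyGetD m (n - 1 - i) []) layer 0)))).flatMap
      (fun ce => [(ce.2.1, (layer, n - 2 * layer + ce.1)), (ce.2.2, (layer, n - 2 * layer + ce.1))])
    = pvRing m n layer := by
  subst hn
  have hlen : ∀ i : Int, 0 ≤ i → i < (m.length : Int) →
      (m.length : Int) ≤ ((PySem.List.pyGetD m i []).length : Int) := by
    intro i hi0 hi1
    rw [PySem.List.pyGetD_eq_getElem m [] hi0 hi1]
    exact hPre _ (m.getElem_mem _)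
  have hrow := hlen layer h0 (by omega)
  have hrowb := hlen ((m.length : Int) - 1 - layer) (by omega) (by omega)
  rw [pvSliceEqMap _ _ _ h0 (by omega) (by omega),
      pvSliceEqMap _ _ _ h0 (by omega) (by omega),
      pvReverseMapRange, List.zip_map', List.zip_map', pvEnumMap, pvEnumMap]
  unfold pvRing
  rw [show (m.length : Int) - 2 * layer = (m.length : Int) - 2 * layer + 0 by ring, pvEnumShift]
  simp only [List.flatMap_map]
  have e1 : ∀ p : Int, layer + ((m.length : Int) - layer) - 1 - p = (m.length : Int) - p - 1 := by
    intro p; ring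
  have e3 : ∀ p : Int, (m.length : Int) - 1 - p = (m.length : Int) - p - 1 := by
    intro p; ring
  have e4 : ∀ p : Int, (m.length : Int) - 2 * layer + 0 + p = (m.length : Int) - 2 * layer + p := by
    intro p; ring
  simp only [e1, e3, e4]

-- A's layer body equals folding pvRing (loop 1 runs n-2*layer times, so loop 2's count starts there)
lemma pvRingA (m : List (List Int)) (n : Int) (hn : n = (m.length : Int)) (d : PySem.Dict Int (Int × Int)) (layer : Int)
    (h1 : layer < n - layer) :
    ((PySem.List.pyRange (layer + 1) (n - layer - 1)).foldl
        (fun (p : PySem.Dict Int (Int × Int) × Int) i =>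
          ((p.1.insert (PySem.List.pyGetD (PySem.List.pyGetD m i []) (n - layer - 1) 0) (layer, p.2)).insert
              (PySem.List.pyGetD (PySem.List.pyGetD m (n - i - 1) []) layer 0) (layer, p.2),
           p.2 + 1))
        ((PySem.List.pyRange layer (n - layer)).foldl
          (fun (p : PySem.Dict Int (Int × Int) × Int) j =>
            ((p.1.insert (PySem.List.pyGetD (PySem.List.pyGetD m layer []) j 0) (layer, p.2)).insert
                (PySem.List.pyGetD (PySem.List.pyGetD m (n - layer - 1) []) (n - j - 1) 0) (layer, p.2),
             p.2 + 1)) (d, 0))).1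
    = List.foldl (fun d kv => d.insert kv.1 kv.2) d (pvRing m n layer) := by
  subst hn
  rw [pvFoldlInsert2]
  rw [pvFoldlInsert2]
  dsimp only
  have hc : (0 : Int) + ((PySem.List.pyRange layer ((m.length : Int) - layer)).length : Int)
      = (m.length : Int) - 2 * layer := by
    simp only [PySem.List.length_pyRange_one]
    omega
  rw [hc]
  unfold pvRing
  rw [List.foldl_append]

lemma pvLayersNum (n : Int) : PySem.Int.floordiv (n + 1) 2 = (n + 1) / 2 := by
  simp [PySem.Int.floordiv, Int.fdiv_eq_ediv]

lemma pvPeelEq (m : List (List Int)) (hPre : Pre_compute_cross_priority m) :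
    ∀ (k : Nat) (layer : Int), 0 ≤ layer → (((m.length : Int) - 2 * layer).toNat = k) →
    pvPeel m (m.length : Int) layer
      = (PySem.List.pyRange layer (PySem.Int.floordiv ((m.length : Int) + 1) 2)).flatMap
          (pvRing m (m.length : Int)) := by
  intro k
  induction k using Nat.strong_induction_on with
  | _ k ih =>
    intro layer h0 hk
    have hL : PySem.Int.floordiv ((m.length : Int) + 1) 2 = ((m.length : Int) + 1) / 2 :=
      pvLayersNum _
    rw [hL, pvPeel]
    split_ifs with hguard
    · rw [PySem.List.pyRange_one_eq_nil (by omega)]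
      simp
    · dsimp only
      conv_rhs => rw [PySem.List.pyRange_one_cons (show layer < ((m.length : Int) + 1) / 2 by omega)]
      rw [List.flatMap_cons]
      congr 1
      · exact pvRingB m _ layer rfl hPre h0 (by omega)
      · have := ih (((m.length : Int) - 2 * (layer + 1)).toNat) (by omega) (layer + 1) (by omega) rfl
        rw [hL] at this
        exact this

-- ===== VERDICT (by name: the statement is the Claim_ definition above) =====
theorem compute_cross_priority_spec : Claim_equal_compute_cross_priority := by
  intro m hDom hPre
  unfold Spec_compute_cross_priority
  simp only [compute_cross_priority, compute_cross_priority_alt, PySem.Dict.ofList, PySem.Dict.update]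
  rw [pvPeelEq m hPre (((m.length : Int) - 0).toNat) 0 le_rfl (by omega)]
  rw [PySem.List.foldl_congr_mem _ _
    (fun d layer => List.foldl (fun d kv => d.insert kv.1 kv.2) d (pvRing m (m.length : Int) layer)) _
    (by
      intro acc layer hmem
      rw [PySem.List.mem_pyRange_one] at hmem
      have hL : PySem.Int.floordiv ((m.length : Int) + 1) 2 = ((m.length : Int) + 1) / 2 :=
        pvLayersNum _
      exact pvRingA m _ rfl acc layer (by omega))]
  rw [pvFoldlFlatMap]
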